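-- pv_equiv track=rewrite | github.com/maximpertsov/xiangqi-server | lib/fen.py | decode_fen_row
-- ===== SOURCE A (Python) =====
-- def decode_fen_row(i, row):
--     result = []
--     j = 0
--     for ch in row:
--         if ch.isdigit():
--             j += int(ch)
--             continue
--         result.append({'name': ch, 'starting_position': '{},{}'.format(i, j)})
--         j += 1
--     return result
-- ===== SOURCE B (Python) =====
-- def decode_fen_row(i, row):
--     squares = []
--     for ch in row:
--         if ch.isdigit():
--             squares.extend([None] * int(ch))
--         else:
--             squares.append(ch)
--     return [{'name': ch, 'starting_position': '{},{}'.format(i, col)}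
--             for col, ch in enumerate(squares) if ch is not None]
-- ===== Notes on version B (the rewrite author's own statement) =====
-- stated objective: alternative
-- what changed: B replaces A's single pass with a manual column counter j by a two-phase decomposition: it first expands the FEN row into an explicit squares list (int(ch) copies of None per digit, the piece char otherwise) and then emits the piece dicts from enumerate(squares), the enumeration index serving as the column.
import Mathlib
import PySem

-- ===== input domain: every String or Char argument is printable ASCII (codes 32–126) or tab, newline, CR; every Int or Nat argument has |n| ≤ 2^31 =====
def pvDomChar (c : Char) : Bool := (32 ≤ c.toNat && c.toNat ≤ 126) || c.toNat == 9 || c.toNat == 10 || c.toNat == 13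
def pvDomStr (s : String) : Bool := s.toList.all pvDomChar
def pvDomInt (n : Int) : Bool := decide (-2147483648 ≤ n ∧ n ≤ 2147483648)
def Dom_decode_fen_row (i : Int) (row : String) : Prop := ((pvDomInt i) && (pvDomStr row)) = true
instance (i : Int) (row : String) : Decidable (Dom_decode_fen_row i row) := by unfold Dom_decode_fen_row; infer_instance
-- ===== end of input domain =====

-- B decodes the row in two phases (expand to an explicit squares list, then emit pieces from its
-- enumeration) instead of A's single pass with a manual column counter; same cost, alternative structure.

-- the piece dict {'name': ch, 'starting_position': '{},{}'.format(i, j)} (shared literal of both sources)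
def fenPiece (i j : Int) (ch : Char) : List (String × String) :=
  [("name", String.mk [ch]),
   ("starting_position", String.mk (PySem.Int.toChars i ++ [','] ++ PySem.Int.toChars j))]

-- ===== PORT A =====
-- loop state: (result, j); ch.isdigit() → Chars.isdigit; int(ch) → Int.ofChars? (never none on digits)
def decode_fen_row (i : Int) (row : String) : List (List (String × String)) :=
  (row.toList.foldl
    (fun (st : List (List (String × String)) × Int) ch =>
      if PySem.Chars.isdigit ch then
        (st.1, st.2 + (PySem.Int.ofChars? [ch]).getD 0)
      else
        (st.1 ++ [fenPiece i st.2 ch], st.2 + 1))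
    ([], 0)).1

-- ===== PORT B =====
-- phase 1: expanded squares list ([None]*int(ch) → pyRepeat [none] …); phase 2: enumerate + emit
def decode_fen_row_alt (i : Int) (row : String) : List (List (String × String)) :=
  let squares : List (Option Char) := row.toList.foldl
    (fun acc ch =>
      acc ++ (if PySem.Chars.isdigit ch then
                PySem.List.pyRepeat [none] ((PySem.Int.ofChars? [ch]).getD 0)
              else [some ch])) []
  (PySem.List.enumerate squares 0).filterMap
    (fun p => p.2.map (fun ch => fenPiece i p.1 ch))

-- ===== PRECONDITION & SPEC =====
def Spec_decode_fen_row (i : Int) (row : String) (out : List (List (String × String))) : Prop := out = decode_fen_row_alt i row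
instance (i : Int) (row : String) (out : List (List (String × String))) : Decidable (Spec_decode_fen_row i row out) := by unfold Spec_decode_fen_row; infer_instance

-- ===== CLAIM (what is proved, stated in full; the proofs are below) =====
def Claim_equal_decode_fen_row : Prop := ∀ (i : Int) (row : String), Dom_decode_fen_row i row → Spec_decode_fen_row i row (decode_fen_row i row)

-- ===== LEMMAS AND PROOFS =====

theorem char_eq_of_toNat {c : Char} {n : Nat} (d : Char) (h : c.val.toNat = n) (hd : d.val.toNat = n) :
    c = d := by
  apply Char.ext
  exact UInt32.toNat_inj.mp (by omega)

-- the numeric range of a digit character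
theorem isdigit_range (c : Char) (h : PySem.Chars.isdigit c = true) :
    48 ≤ c.val.toNat ∧ c.val.toNat ≤ 57 := by
  unfold PySem.Chars.isdigit at h
  simp only [Bool.and_eq_true, decide_eq_true_eq, Char.le_def, UInt32.le_iff_toNat_le] at h
  have e0 : ('0' : Char).val.toNat = 48 := rfl
  have e9 : ('9' : Char).val.toNat = 57 := rfl
  rw [e0] at h
  rw [e9] at h
  exact h

-- a digit character's int() value
theorem digit_val (c : Char) (h : PySem.Chars.isdigit c = true) :
    PySem.Int.ofChars? [c] = some ((c.val.toNat : Int) - 48) := by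
  have h48 := isdigit_range c h
  have hd : c.val.toNat = 48 ∨ c.val.toNat = 49 ∨ c.val.toNat = 50 ∨ c.val.toNat = 51 ∨
      c.val.toNat = 52 ∨ c.val.toNat = 53 ∨ c.val.toNat = 54 ∨ c.val.toNat = 55 ∨
      c.val.toNat = 56 ∨ c.val.toNat = 57 := by omega
  rcases hd with h|h|h|h|h|h|h|h|h|h <;>
    first
    | (rw [char_eq_of_toNat '0' h (by decide)]; decide)
    | (rw [char_eq_of_toNat '1' h (by decide)]; decide)
    | (rw [char_eq_of_toNat '2' h (by decide)]; decide)
    | (rw [char_eq_of_toNat '3' h (by decide)]; decide)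
    | (rw [char_eq_of_toNat '4' h (by decide)]; decide)
    | (rw [char_eq_of_toNat '5' h (by decide)]; decide)
    | (rw [char_eq_of_toNat '6' h (by decide)]; decide)
    | (rw [char_eq_of_toNat '7' h (by decide)]; decide)
    | (rw [char_eq_of_toNat '8' h (by decide)]; decide)
    | (rw [char_eq_of_toNat '9' h (by decide)]; decide)

-- a block of empty squares contributes no piece
theorem filterMap_none_block (i : Int) (n : Nat) (j : Int) :
    (PySem.List.enumerate (List.replicate n (none : Option Char)) j).filterMap
      (fun p => p.2.map (fun ch => fenPiece i p.1 ch)) = [] := by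
  induction n generalizing j with
  | zero => simp [PySem.List.enumerate_nil]
  | succ m ih => simp [List.replicate_succ, PySem.List.enumerate_cons, ih]

-- the main invariant: A's loop from column j produces exactly the pieces B emits from
-- the enumeration (starting at j) of the expansion of the remaining characters
theorem decode_loop_eq (i : Int) (l : List Char)
    (acc : List (List (String × String))) (j : Int) :
    (l.foldl
      (fun (st : List (List (String × String)) × Int) ch =>
        if PySem.Chars.isdigit ch then
          (st.1, st.2 + (PySem.Int.ofChars? [ch]).getD 0)
        else
          (st.1 ++ [fenPiece i st.2 ch], st.2 + 1))
      (acc, j)).1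
    = acc ++ (PySem.List.enumerate
        (l.flatMap (fun ch =>
          if PySem.Chars.isdigit ch then
            PySem.List.pyRepeat [(none : Option Char)] ((PySem.Int.ofChars? [ch]).getD 0)
          else [some ch])) j).filterMap
        (fun p => p.2.map (fun ch => fenPiece i p.1 ch)) := by
  induction l generalizing acc j with
  | nil => simp [PySem.List.enumerate_nil]
  | cons c cs ih =>
    by_cases hc : PySem.Chars.isdigit c = true
    · have hv := digit_val c hc
      have hnn : (0 : Int) ≤ (PySem.Int.ofChars? [c]).getD 0 := by
        rw [hv]
        have := isdigit_range c hc
        have e : c.toNat = c.val.toNat := rfl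
        simp
        omega
      simp only [List.foldl_cons, List.flatMap_cons, hc, if_true, ih,
        PySem.List.pyRepeat_singleton, PySem.List.enumerate_append, List.filterMap_append]
      rw [filterMap_none_block i]
      simp [Int.toNat_of_nonneg hnn]
    · simp only [List.foldl_cons, List.flatMap_cons, hc, ih]
      simp

-- ===== VERDICT (by name: the statement is the Claim_ definition above) =====
theorem decode_fen_row_spec : Claim_equal_decode_fen_row := by
  intro i row _
  unfold Spec_decode_fen_row decode_fen_row decode_fen_row_alt
  rw [decode_loop_eq i row.toList [] 0]
  rw [PySem.List.foldl_append_eq_flatMap]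
  simp
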